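-- pv_equiv track=rewrite | github.com/Language-Technology-Lab/Access-Control-Policy | src/entity_pair_generator.py | get_triple_statistics
-- ===== SOURCE A (Python) =====
-- from typing import Dict, List, Tuple, Set, Optional
--
-- def get_triple_statistics(triples: List[Dict]) -> Dict:
--     """
--     Get statistics about generated triples.
--
--     Args:
--         triples: List of triple dictionaries
--
--     Returns:
--         Dictionary with statistics about the triples
--     """
--     assign_triples = [t for t in triples if t['relationship'] == 'assign']
--     permit_triples = [t for t in triples if t['relationship'] == 'permit']
--     prohibit_triples = [t for t in triples if t['relationship'] == 'prohibit']
--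
--     positive_assign = sum(1 for t in assign_triples if t['expected_result'] == 'Yes')
--     positive_permit = sum(1 for t in permit_triples if t['expected_result'] == 'Yes')
--     positive_prohibit = sum(1 for t in prohibit_triples if t['expected_result'] == 'Yes')
--
--     return {
--         "total_triples": len(triples),
--         "assign_triples": len(assign_triples),
--         "permit_triples": len(permit_triples),
--         "prohibit_triples": len(prohibit_triples),
--         "positive_assign": positive_assign,
--         "positive_permit": positive_permit,
--         "positive_prohibit": positive_prohibit,
--         "negative_assign": len(assign_triples) - positive_assign,
--         "negative_permit": len(permit_triples) - positive_permit,
--         "negative_prohibit": len(prohibit_triples) - positive_prohibit,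
--     }
-- ===== SOURCE B (Python) =====
-- def get_triple_statistics(triples):
--     """Single pass: six running counters instead of A's six list/generator passes."""
--     n_assign = n_permit = n_prohibit = 0
--     pos_assign = pos_permit = pos_prohibit = 0
--     for t in triples:
--         r = t['relationship']
--         if r == 'assign':
--             n_assign += 1
--             if t['expected_result'] == 'Yes':
--                 pos_assign += 1
--         elif r == 'permit':
--             n_permit += 1
--             if t['expected_result'] == 'Yes':
--                 pos_permit += 1
--         elif r == 'prohibit':
--             n_prohibit += 1
--             if t['expected_result'] == 'Yes':
--                 pos_prohibit += 1
--     return {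
--         "total_triples": len(triples),
--         "assign_triples": n_assign,
--         "permit_triples": n_permit,
--         "prohibit_triples": n_prohibit,
--         "positive_assign": pos_assign,
--         "positive_permit": pos_permit,
--         "positive_prohibit": pos_prohibit,
--         "negative_assign": n_assign - pos_assign,
--         "negative_permit": n_permit - pos_permit,
--         "negative_prohibit": n_prohibit - pos_prohibit,
--     }
-- ===== Notes on version B (the rewrite author's own statement) =====
-- stated objective: alternative
-- what changed: Replaces A's six separate passes (three filters plus three generator sums) with a single loop over the triples maintaining six running counters, computing negatives as total minus positive.
import Mathlib
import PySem

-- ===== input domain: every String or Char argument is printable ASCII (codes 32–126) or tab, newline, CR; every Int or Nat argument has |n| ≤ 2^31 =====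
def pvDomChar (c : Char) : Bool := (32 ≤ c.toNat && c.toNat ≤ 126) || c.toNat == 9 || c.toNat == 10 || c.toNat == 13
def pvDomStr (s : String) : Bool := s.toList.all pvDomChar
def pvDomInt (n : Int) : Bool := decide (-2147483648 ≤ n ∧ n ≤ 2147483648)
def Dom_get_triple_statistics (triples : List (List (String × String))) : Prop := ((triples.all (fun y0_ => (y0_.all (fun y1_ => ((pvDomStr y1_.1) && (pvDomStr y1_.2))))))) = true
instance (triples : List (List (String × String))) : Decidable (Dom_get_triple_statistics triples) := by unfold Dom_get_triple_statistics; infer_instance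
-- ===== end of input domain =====

-- B makes one pass with six running counters where A makes six passes; same values everywhere A returns.

-- ===== PORT A =====
-- t['relationship'] / t['expected_result'] are KeyError-raising lookups; Pre_ excludes
-- the raising inputs, so getD with a dummy default is exact on Pre_.
def get_triple_statistics (triples : List (List (String × String))) : List (String × Int) :=
  let assign_triples := triples.filter (fun t => (PySem.Dict.mk t).getD "relationship" "" == "assign")
  let permit_triples := triples.filter (fun t => (PySem.Dict.mk t).getD "relationship" "" == "permit")
  let prohibit_triples := triples.filter (fun t => (PySem.Dict.mk t).getD "relationship" "" == "prohibit")
  let positive_assign : Int := ((assign_triples.filter (fun t => (PySem.Dict.mk t).getD "expected_result" "" == "Yes")).length : Int)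
  let positive_permit : Int := ((permit_triples.filter (fun t => (PySem.Dict.mk t).getD "expected_result" "" == "Yes")).length : Int)
  let positive_prohibit : Int := ((prohibit_triples.filter (fun t => (PySem.Dict.mk t).getD "expected_result" "" == "Yes")).length : Int)
  [("total_triples", (triples.length : Int)),
   ("assign_triples", (assign_triples.length : Int)),
   ("permit_triples", (permit_triples.length : Int)),
   ("prohibit_triples", (prohibit_triples.length : Int)),
   ("positive_assign", positive_assign),
   ("positive_permit", positive_permit),
   ("positive_prohibit", positive_prohibit),
   ("negative_assign", (assign_triples.length : Int) - positive_assign),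
   ("negative_permit", (permit_triples.length : Int) - positive_permit),
   ("negative_prohibit", (prohibit_triples.length : Int) - positive_prohibit)]

-- ===== PORT B =====
-- state = (n_assign, pos_assign, n_permit, pos_permit, n_prohibit, pos_prohibit)
def gtsStep (s : Int × Int × Int × Int × Int × Int) (t : List (String × String)) :
    Int × Int × Int × Int × Int × Int :=
  let r := (PySem.Dict.mk t).getD "relationship" ""
  if r == "assign" then
    let p : Int := if (PySem.Dict.mk t).getD "expected_result" "" == "Yes" then 1 else 0
    (s.1 + 1, s.2.1 + p, s.2.2.1, s.2.2.2.1, s.2.2.2.2.1, s.2.2.2.2.2)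
  else if r == "permit" then
    let p : Int := if (PySem.Dict.mk t).getD "expected_result" "" == "Yes" then 1 else 0
    (s.1, s.2.1, s.2.2.1 + 1, s.2.2.2.1 + p, s.2.2.2.2.1, s.2.2.2.2.2)
  else if r == "prohibit" then
    let p : Int := if (PySem.Dict.mk t).getD "expected_result" "" == "Yes" then 1 else 0
    (s.1, s.2.1, s.2.2.1, s.2.2.2.1, s.2.2.2.2.1 + 1, s.2.2.2.2.2 + p)
  else s

def get_triple_statistics_alt (triples : List (List (String × String))) : List (String × Int) :=
  let s := triples.foldl gtsStep (0, 0, 0, 0, 0, 0)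
  [("total_triples", (triples.length : Int)),
   ("assign_triples", s.1),
   ("permit_triples", s.2.2.1),
   ("prohibit_triples", s.2.2.2.2.1),
   ("positive_assign", s.2.1),
   ("positive_permit", s.2.2.2.1),
   ("positive_prohibit", s.2.2.2.2.2),
   ("negative_assign", s.1 - s.2.1),
   ("negative_permit", s.2.2.1 - s.2.2.2.1),
   ("negative_prohibit", s.2.2.2.2.1 - s.2.2.2.2.2)]

-- ===== PRECONDITION & SPEC =====
-- Pre_ excludes exactly the inputs on which Python A raises KeyError: a triple without a
-- 'relationship' key, or one whose relationship is assign/permit/prohibit but which lacks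
-- 'expected_result'.  (B raises identically there; nothing A returns on is excluded.)
def Pre_get_triple_statistics (triples : List (List (String × String))) : Prop :=
  ∀ t ∈ triples,
    ((PySem.Dict.mk t).get? "relationship").isSome = true ∧
    ((PySem.Dict.mk t).getD "relationship" "" ∈ (["assign", "permit", "prohibit"] : List String) →
      ((PySem.Dict.mk t).get? "expected_result").isSome = true)
instance (triples : List (List (String × String))) : Decidable (Pre_get_triple_statistics triples) := by
  unfold Pre_get_triple_statistics; infer_instance
def pvWitness_get_triple_statistics : (List (List (String × String))) :=
  [[("relationship", "assign"), ("expected_result", "Yes")],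
   [("relationship", "other")]]
def Spec_get_triple_statistics (triples : List (List (String × String))) (out : List (String × Int)) : Prop := out = get_triple_statistics_alt triples
instance (triples : List (List (String × String))) (out : List (String × Int)) : Decidable (Spec_get_triple_statistics triples out) := by unfold Spec_get_triple_statistics; infer_instance

-- ===== CLAIM (what is proved, stated in full; the proofs are below) =====
def Claim_equal_get_triple_statistics : Prop := ∀ (triples : List (List (String × String))), Dom_get_triple_statistics triples → Pre_get_triple_statistics triples → Spec_get_triple_statistics triples (get_triple_statistics triples)

-- ===== LEMMAS AND PROOFS =====

def gtsRel (name : String) (t : List (String × String)) : Bool :=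
  (PySem.Dict.mk t).getD "relationship" "" == name
def gtsYes (t : List (String × String)) : Bool :=
  (PySem.Dict.mk t).getD "expected_result" "" == "Yes"

theorem gts_fold_spec (ts : List (List (String × String))) :
    ∀ s : Int × Int × Int × Int × Int × Int,
    ts.foldl gtsStep s =
      (s.1 + (ts.countP (gtsRel "assign") : Int),
       s.2.1 + (ts.countP (fun t => gtsRel "assign" t && gtsYes t) : Int),
       s.2.2.1 + (ts.countP (gtsRel "permit") : Int),
       s.2.2.2.1 + (ts.countP (fun t => gtsRel "permit" t && gtsYes t) : Int),
       s.2.2.2.2.1 + (ts.countP (gtsRel "prohibit") : Int),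
       s.2.2.2.2.2 + (ts.countP (fun t => gtsRel "prohibit" t && gtsYes t) : Int)) := by
  induction ts with
  | nil => intro s; simp
  | cons t ts ih =>
    intro s
    simp only [List.foldl_cons, ih, List.countP_cons]
    unfold gtsStep
    by_cases ha : gtsRel "assign" t
    · have hv : (PySem.Dict.mk t).getD "relationship" "" = "assign" := by
        simpa [gtsRel] using ha
      by_cases hy : (PySem.Dict.mk t).getD "expected_result" "" = "Yes" <;>
        simp [gtsRel, gtsYes, hv, hy] <;> omega
    · by_cases hp : gtsRel "permit" t
      · have hv : (PySem.Dict.mk t).getD "relationship" "" = "permit" := by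
          simpa [gtsRel] using hp
        by_cases hy : (PySem.Dict.mk t).getD "expected_result" "" = "Yes" <;>
          simp [gtsRel, gtsYes, hv, hy] <;> omega
      · by_cases hr : gtsRel "prohibit" t
        · have hv : (PySem.Dict.mk t).getD "relationship" "" = "prohibit" := by
            simpa [gtsRel] using hr
          by_cases hy : (PySem.Dict.mk t).getD "expected_result" "" = "Yes" <;>
            simp [gtsRel, gtsYes, hv, hy] <;> omega
        · simp only [gtsRel] at ha hp hr
          simp [ha, hp, hr, gtsRel]

-- ===== VERDICT (by name: the statement is the Claim_ definition above) =====
theorem get_triple_statistics_spec : Claim_equal_get_triple_statistics := by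
  intro triples _ _
  unfold Spec_get_triple_statistics get_triple_statistics get_triple_statistics_alt
  rw [gts_fold_spec]
  simp [List.countP_eq_length_filter, List.filter_filter, gtsRel, gtsYes, Bool.and_comm]
  exact ⟨rfl, rfl, rfl, rfl, rfl, rfl⟩
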